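-- pv_equiv track=rewrite | github.com/kimeisele/agent-city | city/semantic.py | _walk_direction
-- ===== SOURCE A (Python) =====
-- _ELEM_INT: dict[str, int] = {
--     "akasha": 0, "vayu": 1, "agni": 2, "jala": 3, "prithvi": 4,
-- }
--
-- def _walk_direction(element_walk: list[str]) -> str:
--     """Compute walk direction from element walk.
--
--     Ascending = evolving (akasha→prithvi direction, consciousness manifesting)
--     Descending = resolving (prithvi→akasha direction, matter returning to source)
--     Steady = maintaining
--     """
--     if len(element_walk) < 2:
--         return "steady"
--     ints = [_ELEM_INT.get(e, 4) for e in element_walk]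
--     direction = sum(ints[i + 1] - ints[i] for i in range(len(ints) - 1))
--     if direction > 1:
--         return "manifesting"
--     if direction < -1:
--         return "resolving"
--     return "steady"
-- ===== SOURCE B (Python) =====
-- _ELEM_INT: dict[str, int] = {
--     "akasha": 0, "vayu": 1, "agni": 2, "jala": 3, "prithvi": 4,
-- }
--
-- def _walk_direction(element_walk: list[str]) -> str:
--     # The sum of consecutive differences telescopes: only the first and
--     # last elements matter.
--     if len(element_walk) < 2:
--         return "steady"
--     direction = _ELEM_INT.get(element_walk[-1], 4) - _ELEM_INT.get(element_walk[0], 4)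
--     if direction > 1:
--         return "manifesting"
--     if direction < -1:
--         return "resolving"
--     return "steady"
-- ===== Notes on version B (the rewrite author's own statement) =====
-- stated objective: faster
-- what changed: The O(n) sum of consecutive element-value differences telescopes to last-minus-first, so B maps only the first and last elements and does no list pass or summation.
import Mathlib
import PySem

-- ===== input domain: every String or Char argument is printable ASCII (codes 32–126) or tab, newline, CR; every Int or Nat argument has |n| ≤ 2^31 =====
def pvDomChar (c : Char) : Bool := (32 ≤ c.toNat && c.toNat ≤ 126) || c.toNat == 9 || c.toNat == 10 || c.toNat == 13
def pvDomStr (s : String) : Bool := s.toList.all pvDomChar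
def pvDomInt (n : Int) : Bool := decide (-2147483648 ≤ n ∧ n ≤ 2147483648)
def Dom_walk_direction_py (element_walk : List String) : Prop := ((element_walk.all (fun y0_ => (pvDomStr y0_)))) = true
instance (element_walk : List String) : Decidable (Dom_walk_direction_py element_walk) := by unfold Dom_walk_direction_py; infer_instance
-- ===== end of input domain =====

-- B replaces A's O(n) sum of consecutive differences by the telescoped value last-minus-first (O(1)).

-- module constant _ELEM_INT (shared by both Pythons)
def elemDict : PySem.Dict String Int :=
  PySem.Dict.ofList [("akasha", 0), ("vayu", 1), ("agni", 2), ("jala", 3), ("prithvi", 4)]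

-- ===== PORT A =====
def walk_direction_py (element_walk : List String) : String :=
  if element_walk.length < 2 then "steady"
  else
    let ints := element_walk.map (fun e => PySem.Dict.getD elemDict e 4)
    let direction := ((PySem.List.pyRange 0 ((ints.length : Int) - 1) 1).map
        (fun i => PySem.List.pyGetD ints (i + 1) 0 - PySem.List.pyGetD ints i 0)).sum
    if direction > 1 then "manifesting"
    else if direction < -1 then "resolving"
    else "steady"

-- ===== PORT B =====
def walk_direction_py_alt (element_walk : List String) : String :=
  if element_walk.length < 2 then "steady"
  else
    let direction := PySem.Dict.getD elemDict (PySem.List.pyGetD element_walk (-1) "") 4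
                   - PySem.Dict.getD elemDict (PySem.List.pyGetD element_walk 0 "") 4
    if direction > 1 then "manifesting"
    else if direction < -1 then "resolving"
    else "steady"

-- ===== PRECONDITION & SPEC =====
def Spec_walk_direction_py (element_walk : List String) (out : String) : Prop := out = walk_direction_py_alt element_walk
instance (element_walk : List String) (out : String) : Decidable (Spec_walk_direction_py element_walk out) := by unfold Spec_walk_direction_py; infer_instance

-- ===== CLAIM (what is proved, stated in full; the proofs are below) =====
def Claim_equal_walk_direction_py : Prop := ∀ (element_walk : List String), Dom_walk_direction_py element_walk → Spec_walk_direction_py element_walk (walk_direction_py element_walk)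

-- ===== LEMMAS AND PROOFS =====

-- telescoping over Nat-indexed getD, by induction on the list
theorem tel_nat (xs : List Int) :
    ((List.range (xs.length - 1)).map
        (fun k => xs.getD (k + 1) 0 - xs.getD k 0)).sum
      = xs.getLastD 0 - xs.headD 0 := by
  induction xs with
  | nil => simp
  | cons x xs ih =>
    cases xs with
    | nil => simp
    | cons y t =>
      have hlen : (x :: y :: t).length - 1 = ((y :: t).length - 1) + 1 := by
        simp
      rw [hlen, List.range_succ_eq_map, List.map_cons, List.map_map, List.sum_cons]
      have : ((List.range ((y :: t).length - 1)).map
          ((fun k => (x :: y :: t).getD (k + 1) 0 - (x :: y :: t).getD k 0) ∘ Nat.succ)).sum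
          = ((List.range ((y :: t).length - 1)).map
          (fun k => (y :: t).getD (k + 1) 0 - (y :: t).getD k 0)).sum := by
        apply congrArg
        apply List.map_congr_left
        intro k _
        simp [List.getD]
      rw [this, ih]
      simp [List.getLastD]

-- the pyRange/pyGetD form of A's sum equals the Nat form
theorem tel_py (xs : List Int) :
    ((PySem.List.pyRange 0 ((xs.length : Int) - 1) 1).map
        (fun i => PySem.List.pyGetD xs (i + 1) 0 - PySem.List.pyGetD xs i 0)).sum
      = xs.getLastD 0 - xs.headD 0 := by
  rw [PySem.List.pyRange_one, List.map_map]
  have h1 : (((xs.length : Int) - 1) - 0).toNat = xs.length - 1 := by omega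
  rw [h1]
  refine Eq.trans ?_ (tel_nat xs)
  congr 1
  apply List.map_congr_left
  intro k _
  have hc : (0 : Int) + (k : Int) + 1 = ((k + 1 : Nat) : Int) := by push_cast; ring
  simp only [Function.comp_apply, hc, PySem.List.pyGetD_natCast]
  simp

theorem walk_direction_py_spec : Claim_equal_walk_direction_py := by
  intro w _
  unfold Spec_walk_direction_py walk_direction_py walk_direction_py_alt
  by_cases h : w.length < 2
  · simp [h]
  · simp only [h, if_false]
    have hne : w ≠ [] := by
      intro he; rw [he] at h; simp at h
    rw [tel_py]
    have hlast : (w.map (fun e => PySem.Dict.getD elemDict e 4)).getLastD 0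
        = PySem.Dict.getD elemDict (PySem.List.pyGetD w (-1) "") 4 := by
      rw [PySem.List.pyGetD_neg_one w "" hne]
      rw [List.getLastD_eq_getLast?, List.getLast?_map]
      rw [List.getLast?_eq_some_getLast hne]
      simp
    have hhead : (w.map (fun e => PySem.Dict.getD elemDict e 4)).headD 0
        = PySem.Dict.getD elemDict (PySem.List.pyGetD w 0 "") 4 := by
      cases w with
      | nil => exact absurd rfl hne
      | cons a t => simp [PySem.List.pyGetD_zero_cons]
    rw [hlast, hhead]
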